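-- pv_equiv track=rewrite | github.com/lelis-research/MDP-Experiment-Framework | RLBase/Evaluate/Utils.py | normalize_ansi_frames
-- ===== SOURCE A (Python) =====
-- def normalize_ansi_frames(text_frames):
--     """
--     Convert list of ANSI strings to (frames_lines, max_cols, max_rows) so
--     every frame can be drawn on an identical canvas.
--     """
--     frames_lines = []
--     max_cols = 0
--     max_rows = 0
--     for t in text_frames:
--         if isinstance(t, bytes):
--             t = t.decode("utf-8", errors="ignore")
--         lines = t.splitlines()
--         while lines and lines[-1].strip() == "":
--             lines.pop()
--         if not lines:
--             lines = [" "]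
--         # keep monospace alignment stable
--         lines = [ln.replace("\t", "    ") for ln in lines]
--         max_cols = max(max_cols, max(len(ln) for ln in lines))
--         max_rows = max(max_rows, len(lines))
--         frames_lines.append(lines)
--     return frames_lines, max_cols, max_rows
-- ===== SOURCE B (Python) =====
-- def normalize_ansi_frames(text_frames):
--     """
--     Convert list of ANSI strings to (frames_lines, max_cols, max_rows) so
--     every frame can be drawn on an identical canvas.
--     """
--     frames_lines = []
--     for t in text_frames:
--         if isinstance(t, bytes):
--             t = t.decode("utf-8", errors="ignore")
--         lines = t.splitlines()
--         # forward scan: index just past the last non-blank line (0 if none)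
--         cut = 0
--         for i, ln in enumerate(lines):
--             if ln.strip():
--                 cut = i + 1
--         kept = lines[:cut] if cut else [" "]
--         frames_lines.append([ln.replace("\t", "    ") for ln in kept])
--     max_rows = max(map(len, frames_lines), default=0)
--     max_cols = max((len(ln) for ls in frames_lines for ln in ls), default=0)
--     return frames_lines, max_cols, max_rows
-- ===== Notes on version B (the rewrite author's own statement) =====
-- stated objective: alternative
-- what changed: Trailing blank lines are removed by a single forward enumerate scan that records the index past the last non-blank line and slices once (instead of A's backward while/pop mutation loop), and the two maxima are computed in a separate aggregation pass with max(..., default=0) instead of running maxima threaded through the frame loop.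
import Mathlib
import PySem

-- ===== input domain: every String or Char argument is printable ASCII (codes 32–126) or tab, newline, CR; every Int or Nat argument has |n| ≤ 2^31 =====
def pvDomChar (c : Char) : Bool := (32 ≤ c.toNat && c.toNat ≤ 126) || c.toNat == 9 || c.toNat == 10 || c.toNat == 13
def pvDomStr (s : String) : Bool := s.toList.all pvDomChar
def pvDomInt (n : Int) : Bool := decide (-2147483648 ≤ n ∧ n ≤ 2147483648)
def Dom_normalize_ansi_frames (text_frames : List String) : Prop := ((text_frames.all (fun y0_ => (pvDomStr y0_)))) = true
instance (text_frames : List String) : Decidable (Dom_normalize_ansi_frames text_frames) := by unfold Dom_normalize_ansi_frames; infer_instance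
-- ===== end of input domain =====

-- B removes trailing blank lines by a forward enumerate scan + one slice (instead of A's
-- backward while/pop loop) and computes the two maxima in a separate aggregation pass
-- with default 0 instead of running maxima (objective: alternative).


-- ===== PORT A =====
-- port of the while-loop 'while lines and lines[-1].strip() == "": lines.pop()'
-- (recursion over the reversed list = popping from the end)
def pvPopBlankRev : List String → List String
  | [] => []
  | l :: rest => if PySem.Str.strip l = "" then pvPopBlankRev rest else l :: rest

def pvPopBlank (ls : List String) : List String := (pvPopBlankRev ls.reverse).reverse

def normalize_ansi_frames (text_frames : List String) : List (List String) × Int × Int :=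
  text_frames.foldl
    (fun st t =>
      let lines := PySem.Str.splitlines t
      let lines2 := pvPopBlank lines
      let lines3 := if lines2.isEmpty then [" "] else lines2
      let lines4 := lines3.map (fun ln => PySem.Str.replace ln "\t" "    ")
      -- max(max_cols, max(len(ln) for ln in lines)) as a running fold (lines4 ≠ [])
      let max_cols := (lines4.map (fun ln => PySem.Str.len ln)).foldl max st.2.1
      let max_rows := max st.2.2 (PySem.List.len lines4)
      (st.1 ++ [lines4], max_cols, max_rows))
    ([], 0, 0)

-- ===== PORT B =====
def normalize_ansi_frames_alt (text_frames : List String) : List (List String) × Int × Int :=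
  let frames_lines := text_frames.foldl
    (fun acc t =>
      let lines := PySem.Str.splitlines t
      -- 'cut = 0; for i, ln in enumerate(lines): if ln.strip(): cut = i + 1'
      let cut := (PySem.List.enumerate lines).foldl
        (fun cut p => if PySem.Str.strip p.2 ≠ "" then p.1 + 1 else cut) 0
      let kept := if cut = 0 then [" "] else PySem.List.slice lines none (some cut)
      acc ++ [kept.map (fun ln => PySem.Str.replace ln "\t" "    ")])
    []
  let max_rows := PySem.List.maxD (frames_lines.map (fun ls => PySem.List.len ls)) (fun x => x) 0
  let max_cols := PySem.List.maxD ((frames_lines.flatMap id).map (fun ln => PySem.Str.len ln)) (fun x => x) 0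
  (frames_lines, max_cols, max_rows)

-- ===== PRECONDITION & SPEC =====
def Spec_normalize_ansi_frames (text_frames : List String) (out : List (List String) × Int × Int) : Prop := out = normalize_ansi_frames_alt text_frames
instance (text_frames : List String) (out : List (List String) × Int × Int) : Decidable (Spec_normalize_ansi_frames text_frames out) := by unfold Spec_normalize_ansi_frames; infer_instance

-- ===== CLAIM =====
def Claim_equal_normalize_ansi_frames : Prop := ∀ (text_frames : List String), Dom_normalize_ansi_frames text_frames → Spec_normalize_ansi_frames text_frames (normalize_ansi_frames text_frames)

-- ===== LEMMAS AND PROOFS =====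
-- A's per-frame result, as a function (proof-side abbreviation of A's loop body)
def pvNormFrame (t : String) : List String :=
  let lines := PySem.Str.splitlines t
  let lines2 := pvPopBlank lines
  let lines3 := if lines2.isEmpty then [" "] else lines2
  lines3.map (fun ln => PySem.Str.replace ln "\t" "    ")

lemma pvPopBlankRev_suffix (ls : List String) : (pvPopBlankRev ls).IsSuffix ls := by
  induction ls with
  | nil => simp [pvPopBlankRev]
  | cons l rest ih =>
      simp only [pvPopBlankRev]
      split
      · exact ih.trans (List.suffix_cons l rest)
      · exact List.suffix_refl _

lemma pvPopBlank_prefix (ls : List String) : (pvPopBlank ls).IsPrefix ls := by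
  have h := (pvPopBlankRev_suffix ls.reverse).reverse
  simpa [pvPopBlank] using h

lemma pvPopBlank_take (ls : List String) : ls.take (pvPopBlank ls).length = pvPopBlank ls :=
  (List.prefix_iff_eq_take.mp (pvPopBlank_prefix ls)).symm

-- the forward-scan cut equals the length of A's trimmed list
lemma pvCut_eq (ls : List String) :
    (PySem.List.enumerate ls).foldl
      (fun cut p => if PySem.Str.strip p.2 ≠ "" then p.1 + 1 else cut) 0
    = ((pvPopBlank ls).length : Int) := by
  induction ls using List.reverseRecOn with
  | nil => simp [pvPopBlank, pvPopBlankRev, PySem.List.enumerate]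
  | append_singleton xs x ih =>
      rw [PySem.List.enumerate_append]
      simp only [List.foldl_append, PySem.List.enumerate, List.foldl_cons, List.foldl_nil]
      rw [ih]
      by_cases hx : PySem.Str.strip x = ""
      · have hp : pvPopBlank (xs ++ [x]) = pvPopBlank xs := by
          simp [pvPopBlank, pvPopBlankRev, hx]
        simp [hx, hp]
      · have hp : pvPopBlank (xs ++ [x]) = xs ++ [x] := by
          simp [pvPopBlank, pvPopBlankRev, hx]
        simp [hx, hp]

-- B's per-frame computation equals A's
lemma pvFrameB_eq (t : String) :
    (let lines := PySem.Str.splitlines t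
     let cut := (PySem.List.enumerate lines).foldl
       (fun cut p => if PySem.Str.strip p.2 ≠ "" then p.1 + 1 else cut) 0
     let kept := if cut = 0 then [" "] else PySem.List.slice lines none (some cut)
     kept.map (fun ln => PySem.Str.replace ln "\t" "    "))
    = pvNormFrame t := by
  simp only [pvNormFrame, pvCut_eq]
  set ls := PySem.Str.splitlines t with hls
  congr 1
  by_cases h : (pvPopBlank ls).length = 0
  · simp [List.length_eq_zero_iff.mp h]
  · have hne : ((pvPopBlank ls).length : Int) ≠ 0 := by exact_mod_cast h
    rw [if_neg hne, PySem.List.slice_to ls (by positivity)]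
    simp [List.isEmpty_iff, List.length_eq_zero_iff.not.mp h, Int.toNat_natCast, pvPopBlank_take]

-- max(xs, default=0) over nonnegative ints is the running max from 0
lemma pvMaxD_nonneg (xs : List Int) (h : ∀ x ∈ xs, 0 ≤ x) :
    PySem.List.maxD xs (fun x => x) 0 = xs.foldl max 0 := by
  cases xs with
  | nil => simp [PySem.List.maxD, PySem.List.max?]
  | cons x t =>
      rw [PySem.List.maxD, PySem.List.max?_id_cons]
      simp only [Option.getD_some, List.foldl_cons]
      have : max (0 : Int) x = x := max_eq_right (h x (by simp))
      rw [this]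

-- A's fused loop, characterised
lemma pvFoldA_eq (tfs : List String) (acc : List (List String)) (mc mr : Int) :
    tfs.foldl
      (fun st t =>
        let lines := PySem.Str.splitlines t
        let lines2 := pvPopBlank lines
        let lines3 := if lines2.isEmpty then [" "] else lines2
        let lines4 := lines3.map (fun ln => PySem.Str.replace ln "\t" "    ")
        let max_cols := (lines4.map (fun ln => PySem.Str.len ln)).foldl max st.2.1
        let max_rows := max st.2.2 (PySem.List.len lines4)
        (st.1 ++ [lines4], max_cols, max_rows))
      (acc, mc, mr)
    = (acc ++ tfs.map pvNormFrame,
       (((tfs.map pvNormFrame).flatMap id).map (fun ln => PySem.Str.len ln)).foldl max mc,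
       ((tfs.map pvNormFrame).map (fun ls => PySem.List.len ls)).foldl max mr) := by
  induction tfs generalizing acc mc mr with
  | nil => simp
  | cons t ts ih =>
      simp only [List.foldl_cons, List.map_cons, List.flatMap_cons, List.map_append,
        List.foldl_append, List.foldl_cons]
      rw [ih]
      simp [pvNormFrame, List.append_assoc]

-- ===== VERDICT =====
theorem normalize_ansi_frames_spec : Claim_equal_normalize_ansi_frames := by
  intro tfs _
  show normalize_ansi_frames tfs = normalize_ansi_frames_alt tfs
  unfold normalize_ansi_frames normalize_ansi_frames_alt
  have hB : tfs.foldl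
      (fun acc t =>
        let lines := PySem.Str.splitlines t
        let cut := (PySem.List.enumerate lines).foldl
          (fun cut p => if PySem.Str.strip p.2 ≠ "" then p.1 + 1 else cut) 0
        let kept := if cut = 0 then [" "] else PySem.List.slice lines none (some cut)
        acc ++ [kept.map (fun ln => PySem.Str.replace ln "\t" "    ")])
      [] = tfs.map pvNormFrame := by
    have := PySem.List.foldl_append_singleton_eq_map
      (fun t =>
        (let lines := PySem.Str.splitlines t
         let cut := (PySem.List.enumerate lines).foldl
           (fun cut p => if PySem.Str.strip p.2 ≠ "" then p.1 + 1 else cut) 0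
         let kept := if cut = 0 then [" "] else PySem.List.slice lines none (some cut)
         kept.map (fun ln => PySem.Str.replace ln "\t" "    "))) tfs []
    rw [this]
    simp only [List.nil_append]
    exact List.map_congr_left (fun t _ => pvFrameB_eq t)
  rw [pvFoldA_eq, hB]
  simp only [List.nil_append]
  rw [pvMaxD_nonneg _ (by
      intro x hx
      simp only [List.mem_map] at hx
      obtain ⟨ls, _, rfl⟩ := hx
      simp),
    pvMaxD_nonneg _ (by
      intro x hx
      simp only [List.mem_map] at hx
      obtain ⟨ln, _, rfl⟩ := hx
      simp)]
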